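-- pv_equiv track=rewrite | github.com/thepratholic/Competitive-Programming | LeetCode/Weekly Contest 498/Count Good Integers on a Grid Path.py | countGoodIntegersOnPath
-- ===== SOURCE A (Python) =====
-- from functools import lru_cache
--
-- def countGoodIntegersOnPath(l: int, r: int, directions: str) -> int:
--     path = {0}
--     pos = 0
--
--     for d in directions:
--         if d == 'D':
--             pos += 4
--
--         else:
--             pos += 1
--
--         path.add(pos)
--
--
--     def solve(x):
--         s = str(x).zfill(16)
--
--         @lru_cache(None)
--         def f(idx, last, tight):
--             if idx == 16:
--                 return 1
--
--             ub = int(s[idx]) if tight else 9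
--             res = 0
--
--             for digit in range(ub + 1):
--
--                 if idx in path:
--
--                     if digit >= last:
--                         res += f(idx + 1, digit, tight and (digit == ub))
--
--                 else:
--                     res += f(idx + 1, last, tight and (digit == ub))
--
--             return res
--
--         return f(0, 0, True)
--
--     return solve(r) - solve(l - 1)
-- ===== SOURCE B (Python) =====
-- def countGoodIntegersOnPath(l: int, r: int, directions: str) -> int:
--     path = {0}
--     pos = 0
--     for d in directions:
--         pos += 4 if d == 'D' else 1
--         path.add(pos)
--
--     def solve(x):
--         s = str(x).zfill(16)
--         # bottom-up digit DP: histogram `free[last]` of loose states, plus the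
--         # single tight thread (t_last, t_alive)
--         free = [0] * 10
--         t_last, t_alive = 0, True
--         for idx in range(16):
--             ub = int(s[idx])
--             if idx in path:
--                 nf = []
--                 pre = 0
--                 for d in range(10):
--                     pre += free[d]
--                     nf.append(pre + (1 if t_alive and t_last <= d < ub else 0))
--                 if t_alive:
--                     t_alive = t_last <= ub
--                     t_last = ub
--                 free = nf
--             else:
--                 nf = [10 * c for c in free]
--                 if t_alive:
--                     nf[t_last] += ub
--                 free = nf
--         return sum(free) + (1 if t_alive else 0)
--
--     return solve(r) - solve(l - 1)
-- ===== Notes on version B (the rewrite author's own statement) =====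
-- stated objective: alternative
-- what changed: Replaced A's lru_cache top-down recursion over (idx,last,tight) by a bottom-up single pass that carries a 10-slot histogram of loose states (updated with prefix sums at path positions) and a single explicitly-threaded tight state (t_last, t_alive).
import Mathlib
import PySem

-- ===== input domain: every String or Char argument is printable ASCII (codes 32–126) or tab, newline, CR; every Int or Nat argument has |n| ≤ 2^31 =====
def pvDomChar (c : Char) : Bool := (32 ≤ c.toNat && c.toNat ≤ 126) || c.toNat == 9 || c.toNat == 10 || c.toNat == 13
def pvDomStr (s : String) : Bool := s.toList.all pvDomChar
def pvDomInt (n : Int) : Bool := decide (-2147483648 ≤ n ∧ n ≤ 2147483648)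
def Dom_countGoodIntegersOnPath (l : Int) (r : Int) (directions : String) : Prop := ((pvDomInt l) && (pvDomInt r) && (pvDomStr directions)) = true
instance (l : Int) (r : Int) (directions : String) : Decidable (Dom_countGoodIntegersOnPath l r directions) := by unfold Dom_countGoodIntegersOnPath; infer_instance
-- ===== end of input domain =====

-- B replaces A's memoized top-down digit-DP recursion by one bottom-up pass keeping a
-- 10-slot histogram of loose states (prefix sums on path positions) plus the single tight
-- thread; objective: alternative decomposition, same exact values.

-- ===== shared helpers (identical Python lines in A and B) =====
-- int(s[idx]) for a single digit character; exact on '0'..'9' (on non-digits, e.g. the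
-- '-' of a negative x, Python raises ValueError — those inputs are outside Pre_).
def pvDigit (c : Char) : Int := (c.toNat : Int) - 48

-- str(x).zfill(16) as a char list; exact for x ≥ 0 (for x < 0 zfill pads after the sign,
-- but those inputs are outside Pre_).
def pvZfill16 (x : Int) : List Char :=
  let t := PySem.Int.toChars x
  List.replicate (16 - t.length) '0' ++ t

-- path = {0}; pos = 0; for d in directions: pos += 4 if d=='D' else 1; path.add(pos)
def pvBuildPath (directions : String) : PySem.Set Int :=
  (directions.toList.foldl
    (fun (st : PySem.Set Int × Int) d =>
      let pos := if d = 'D' then st.2 + 4 else st.2 + 1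
      (PySem.Set.add st.1 pos, pos))
    (PySem.Set.ofList [(0 : Int)], 0)).1

-- ===== PORT A =====
-- f(idx, last, tight) with its lru_cache ported as an explicit memo dict threaded through
-- the recursion (the decorator is part of A); the loop 'for digit in range(ub+1)' is the
-- foldl; recursion is on the fuel rem = 16 - idx (the Python base case 'idx == 16' is
-- exactly rem = 0 since f starts at f(0,0,True) with 16 levels). Python's f(16,·,·) also
-- caches its 1, which no later call reads at fuel 0; the returned values are identical.
def pvFAM (path : PySem.Set Int) (s : List Char) : Nat → Nat → Int → Bool →
    PySem.Dict (Nat × Int × Bool) Int → Int × PySem.Dict (Nat × Int × Bool) Int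
  | _idx, 0, _last, _tight, c => (1, c)
  | idx, rem+1, last, tight, c =>
    match PySem.Dict.get? c (idx, last, tight) with
    | some v => (v, c)
    | none =>
      let ub : Int := if tight then pvDigit (s.getD idx '0') else 9
      let r := (PySem.List.pyRange 0 (ub + 1) 1).foldl
        (fun (acc : Int × PySem.Dict (Nat × Int × Bool) Int) digit =>
          if PySem.Set.contains path (idx : Int) then
            (if digit ≥ last then
              let v := pvFAM path s (idx+1) rem digit (tight && (digit == ub)) acc.2
              (acc.1 + v.1, v.2)
            else acc)
          else
            let v := pvFAM path s (idx+1) rem last (tight && (digit == ub)) acc.2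
            (acc.1 + v.1, v.2))
        (0, c)
      (r.1, PySem.Dict.insert r.2 (idx, last, tight) r.1)

def pvSolveA (path : PySem.Set Int) (x : Int) : Int :=
  (pvFAM path (pvZfill16 x) 0 16 0 true PySem.Dict.empty).1

def countGoodIntegersOnPath (l : Int) (r : Int) (directions : String) : Int :=
  let path := pvBuildPath directions
  pvSolveA path r - pvSolveA path (l - 1)

-- ===== PORT B =====
-- state = (free histogram over last∈0..9, t_last, t_alive); one step per position idx.
-- nf[t_last] += ub is a read-modify-write through Python indexing (t_last ∈ [0,10) here).
def pvLoopB (path : PySem.Set Int) (s : List Char) : Nat → Nat → List Int × Int × Bool → List Int × Int × Bool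
  | _idx, 0, st => st
  | idx, rem+1, st =>
    let free := st.1
    let tLast := st.2.1
    let tAlive := st.2.2
    let ub : Int := pvDigit (s.getD idx '0')
    let st' :=
      if PySem.Set.contains path (idx : Int) then
        let pnf := (PySem.List.pyRange 0 10 1).foldl
          (fun (acc : Int × List Int) d =>
            let pre := acc.1 + PySem.List.pyGetD free d 0
            (pre, acc.2 ++ [pre + (if tAlive = true ∧ tLast ≤ d ∧ d < ub then 1 else 0)]))
          (0, [])
        if tAlive then (pnf.2, ub, decide (tLast ≤ ub)) else (pnf.2, tLast, tAlive)
      else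
        let nf := free.map (fun c => 10 * c)
        if tAlive then (PySem.List.pySetD nf tLast (PySem.List.pyGetD nf tLast 0 + ub), tLast, tAlive)
        else (nf, tLast, tAlive)
    pvLoopB path s (idx+1) rem st'

def pvSolveB (path : PySem.Set Int) (x : Int) : Int :=
  let st := pvLoopB path (pvZfill16 x) 0 16 (List.replicate 10 0, 0, true)
  st.1.sum + (if st.2.2 then 1 else 0)

def countGoodIntegersOnPath_alt (l : Int) (r : Int) (directions : String) : Int :=
  let path := pvBuildPath directions
  pvSolveB path r - pvSolveB path (l - 1)

-- ===== PRECONDITION & SPEC =====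
-- Pre_ excludes exactly the inputs where A raises ValueError: int('-') on the sign
-- character of str(r) or str(l-1) (i.e. r < 0 or l < 1). B raises there too.
def Pre_countGoodIntegersOnPath (l : Int) (r : Int) (directions : String) : Prop := 1 ≤ l ∧ 0 ≤ r
instance (l : Int) (r : Int) (directions : String) : Decidable (Pre_countGoodIntegersOnPath l r directions) := by unfold Pre_countGoodIntegersOnPath; infer_instance
def pvWitness_countGoodIntegersOnPath : Int × Int × String := (1, 20, "DR")

def Spec_countGoodIntegersOnPath (l : Int) (r : Int) (directions : String) (out : Int) : Prop := out = countGoodIntegersOnPath_alt l r directions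
instance (l : Int) (r : Int) (directions : String) (out : Int) : Decidable (Spec_countGoodIntegersOnPath l r directions out) := by unfold Spec_countGoodIntegersOnPath; infer_instance

-- ===== CLAIM (what is proved, stated in full; the proofs are below) =====
def Claim_equal_countGoodIntegersOnPath : Prop := ∀ (l : Int) (r : Int) (directions : String), Dom_countGoodIntegersOnPath l r directions → Pre_countGoodIntegersOnPath l r directions → Spec_countGoodIntegersOnPath l r directions (countGoodIntegersOnPath l r directions)

-- ===== LEMMAS AND PROOFS =====

-- proof-side pure recursion: the mathematical function A's memoized f computes
def pvFA (path : PySem.Set Int) (s : List Char) : Nat → Nat → Int → Bool → Int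
  | _idx, 0, _last, _tight => 1
  | idx, rem+1, last, tight =>
    let ub : Int := if tight then pvDigit (s.getD idx '0') else 9
    (PySem.List.pyRange 0 (ub + 1) 1).foldl
      (fun res digit =>
        if PySem.Set.contains path (idx : Int) then
          (if digit ≥ last then res + pvFA path s (idx+1) rem digit (tight && (digit == ub)) else res)
        else res + pvFA path s (idx+1) rem last (tight && (digit == ub)))
      0

-- every entry of the memo dict holds the pure value for its key
def pvCacheOK (path : PySem.Set Int) (s : List Char) (c : PySem.Dict (Nat × Int × Bool) Int) : Prop :=
  ∀ idx last tight v, PySem.Dict.get? c (idx, last, tight) = some v →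
    v = pvFA path s idx (16 - idx) last tight

theorem pvFAM_eq (path : PySem.Set Int) (s : List Char) :
    ∀ (rem idx : Nat) (last : Int) (tight : Bool) (c : PySem.Dict (Nat × Int × Bool) Int),
      idx + rem = 16 → pvCacheOK path s c →
      (pvFAM path s idx rem last tight c).1 = pvFA path s idx rem last tight
        ∧ pvCacheOK path s (pvFAM path s idx rem last tight c).2 := by
  intro rem
  induction rem with
  | zero =>
    intro idx last tight c hidx hc
    exact ⟨by simp [pvFAM, pvFA], by simpa [pvFAM] using hc⟩
  | succ rem ih =>
    intro idx last tight c hidx hc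
    have h16 : 16 - idx = rem + 1 := by omega
    cases hget : PySem.Dict.get? c (idx, last, tight) with
    | some v =>
      have hv := hc idx last tight v hget
      rw [h16] at hv
      refine ⟨?_, ?_⟩
      · simp only [pvFAM, hget]; exact hv
      · simp only [pvFAM, hget]; exact hc
    | none =>
      have inner : ∀ (ds : List Int) (res : Int) (c' : PySem.Dict (Nat × Int × Bool) Int),
          pvCacheOK path s c' →
          ((ds.foldl (fun (acc : Int × PySem.Dict (Nat × Int × Bool) Int) digit =>
              if PySem.Set.contains path (idx : Int) then
                (if digit ≥ last then
                  let v := pvFAM path s (idx+1) rem digit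
                    (tight && (digit == (if tight then pvDigit (s.getD idx '0') else 9))) acc.2
                  (acc.1 + v.1, v.2)
                else acc)
              else
                let v := pvFAM path s (idx+1) rem last
                  (tight && (digit == (if tight then pvDigit (s.getD idx '0') else 9))) acc.2
                (acc.1 + v.1, v.2)) (res, c')).1
            = ds.foldl (fun res digit =>
                if PySem.Set.contains path (idx : Int) then
                  (if digit ≥ last then
                    res + pvFA path s (idx+1) rem digit
                      (tight && (digit == (if tight then pvDigit (s.getD idx '0') else 9)))
                  else res)
                else res + pvFA path s (idx+1) rem last
                  (tight && (digit == (if tight then pvDigit (s.getD idx '0') else 9)))) res)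
          ∧ pvCacheOK path s ((ds.foldl (fun (acc : Int × PySem.Dict (Nat × Int × Bool) Int) digit =>
              if PySem.Set.contains path (idx : Int) then
                (if digit ≥ last then
                  let v := pvFAM path s (idx+1) rem digit
                    (tight && (digit == (if tight then pvDigit (s.getD idx '0') else 9))) acc.2
                  (acc.1 + v.1, v.2)
                else acc)
              else
                let v := pvFAM path s (idx+1) rem last
                  (tight && (digit == (if tight then pvDigit (s.getD idx '0') else 9))) acc.2
                (acc.1 + v.1, v.2)) (res, c')).2) := by
        by_cases hp : PySem.Set.contains path (idx : Int) = true
        · simp only [hp, if_true]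
          intro ds
          induction ds with
          | nil => intro res c' hc'; exact ⟨rfl, hc'⟩
          | cons d ds ihd =>
            intro res c' hc'
            simp only [List.foldl_cons]
            by_cases hdl : d ≥ last
            · simp only [if_pos hdl]
              obtain ⟨hv1, hv2⟩ := ih (idx+1) d (tight && (d == (if tight then pvDigit (s.getD idx '0') else 9))) c' (by omega) hc'
              obtain ⟨hr1, hr2⟩ := ihd
                (res + (pvFAM path s (idx+1) rem d (tight && (d == (if tight then pvDigit (s.getD idx '0') else 9))) c').1)
                ((pvFAM path s (idx+1) rem d (tight && (d == (if tight then pvDigit (s.getD idx '0') else 9))) c').2) hv2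
              exact ⟨by rw [hr1, hv1], hr2⟩
            · simp only [if_neg hdl]
              exact ihd res c' hc'
        · simp only [hp, Bool.false_eq_true, if_false]
          intro ds
          induction ds with
          | nil => intro res c' hc'; exact ⟨rfl, hc'⟩
          | cons d ds ihd =>
            intro res c' hc'
            simp only [List.foldl_cons]
            obtain ⟨hv1, hv2⟩ := ih (idx+1) last (tight && (d == (if tight then pvDigit (s.getD idx '0') else 9))) c' (by omega) hc'
            obtain ⟨hr1, hr2⟩ := ihd
              (res + (pvFAM path s (idx+1) rem last (tight && (d == (if tight then pvDigit (s.getD idx '0') else 9))) c').1)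
              ((pvFAM path s (idx+1) rem last (tight && (d == (if tight then pvDigit (s.getD idx '0') else 9))) c').2) hv2
            exact ⟨by rw [hr1, hv1], hr2⟩
      obtain ⟨h1, h2⟩ := inner
        (PySem.List.pyRange 0 ((if tight then pvDigit (s.getD idx '0') else 9) + 1) 1) 0 c hc
      have hpure : pvFA path s idx (rem+1) last tight
          = (PySem.List.pyRange 0 ((if tight then pvDigit (s.getD idx '0') else 9) + 1) 1).foldl
              (fun res digit =>
                if PySem.Set.contains path (idx : Int) then
                  (if digit ≥ last then
                    res + pvFA path s (idx+1) rem digit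
                      (tight && (digit == (if tight then pvDigit (s.getD idx '0') else 9)))
                  else res)
                else res + pvFA path s (idx+1) rem last
                  (tight && (digit == (if tight then pvDigit (s.getD idx '0') else 9)))) 0 := by
        conv_lhs => rw [pvFA]
      refine ⟨?_, ?_⟩
      · simp only [pvFAM, hget]
        rw [h1, hpure]
      · simp only [pvFAM, hget]
        intro i l t v hv
        rw [PySem.Dict.get?_insert] at hv
        by_cases hk : (i, l, t) = (idx, last, tight)
        · rw [if_pos hk] at hv
          have hi : i = idx ∧ l = last ∧ t = tight := by simpa [Prod.ext_iff] using hk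
          obtain ⟨rfl, rfl, rfl⟩ := hi
          injection hv with hv2
          rw [h16, ← hv2, h1, ← hpure]
        · rw [if_neg hk] at hv
          exact h2 i l t v hv

theorem pvSolveA_eq (path : PySem.Set Int) (x : Int) :
    pvSolveA path x = pvFA path (pvZfill16 x) 0 16 0 true := by
  unfold pvSolveA
  exact (pvFAM_eq path (pvZfill16 x) 16 0 0 true PySem.Dict.empty rfl
    (by intro i l t v h; rw [PySem.Dict.get?_empty] at h; cases h)).1


-- every character Nat.toDigits 10 produces is a decimal digit
theorem pvToDigitsCore_digits (f : Nat) : ∀ (n : Nat) (l : List Char),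
    (∀ c ∈ l, 48 ≤ c.toNat ∧ c.toNat ≤ 57) →
    ∀ c ∈ Nat.toDigitsCore 10 f n l, 48 ≤ c.toNat ∧ c.toNat ≤ 57 := by
  induction f with
  | zero => intro n l hl; simpa [Nat.toDigitsCore] using hl
  | succ f ih =>
    intro n l hl c hc
    have hd : 48 ≤ ((n % 10).digitChar).toNat ∧ ((n % 10).digitChar).toNat ≤ 57 := by
      have h10 : n % 10 < 10 := Nat.mod_lt _ (by omega)
      interval_cases h : n % 10 <;> simp [Nat.digitChar]
    simp only [Nat.toDigitsCore] at hc
    split at hc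
    · rw [List.mem_cons] at hc
      rcases hc with hc | hc
      · subst hc; exact hd
      · exact hl _ hc
    · refine ih _ _ ?_ _ hc
      intro c' hc'
      rw [List.mem_cons] at hc'
      rcases hc' with hc' | hc'
      · subst hc'; exact hd
      · exact hl _ hc' 

theorem pvZfill16_digits (x : Int) (hx0 : 0 ≤ x) :
    ∀ c ∈ pvZfill16 x, 48 ≤ c.toNat ∧ c.toNat ≤ 57 := by
  intro c hc
  simp only [pvZfill16, PySem.Int.toChars, List.mem_append] at hc
  rcases hc with hc | hc
  · have := List.eq_of_mem_replicate hc; subst this; decide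
  · rw [if_neg (by omega)] at hc
    exact pvToDigitsCore_digits _ _ [] (by simp) _ hc

theorem pvZfill16_length (x : Int) (hx0 : 0 ≤ x) (hx1 : x ≤ 2147483648) :
    (pvZfill16 x).length = 16 := by
  have hlen : (Nat.toDigits 10 x.toNat).length ≤ 16 := by
    apply Nat.toDigits_length 10 x.toNat 16 (by omega)
    have : x.toNat ≤ 2147483648 := by omega
    omega
  simp only [pvZfill16, PySem.Int.toChars, if_neg (by omega : ¬ x < 0)]
  simp [List.length_append]
  omega

-- digit bounds at every index accessed by the ports
theorem pvGoodS (x : Int) (hx0 : 0 ≤ x) (hx1 : x ≤ 2147483648) :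
    ∀ idx : Nat, idx < 16 →
      0 ≤ pvDigit ((pvZfill16 x).getD idx '0') ∧ pvDigit ((pvZfill16 x).getD idx '0') ≤ 9 := by
  intro idx hidx
  have hlen := pvZfill16_length x hx0 hx1
  have hmem : (pvZfill16 x).getD idx '0' ∈ pvZfill16 x := by
    have : idx < (pvZfill16 x).length := by omega
    rw [List.getD_eq_getElem _ _ this]
    exact List.getElem_mem this
  have := pvZfill16_digits x hx0 _ hmem
  unfold pvDigit; omega

-- [0,B) window of an indicator-sum equals the [lo,hi) range sum
theorem pvSumWindow (g : Int → Int) (lo hi B : Int) (hlo : 0 ≤ lo) (hhi : hi ≤ B) :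
    ((PySem.List.pyRange 0 B 1).map (fun d => if lo ≤ d ∧ d < hi then g d else 0)).sum
      = ((PySem.List.pyRange lo hi 1).map g).sum := by
  by_cases hlh : lo ≤ hi
  · rw [PySem.List.pyRange_one_append 0 lo B hlo (by omega),
        PySem.List.pyRange_one_append lo hi B hlh hhi]
    rw [List.map_append, List.map_append, List.sum_append, List.sum_append]
    have h1 : ((PySem.List.pyRange 0 lo 1).map (fun d => if lo ≤ d ∧ d < hi then g d else 0)).sum = 0 := by
      apply List.sum_eq_zero; intro y hy
      simp only [List.mem_map] at hy
      obtain ⟨d, hd, rfl⟩ := hy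
      rw [PySem.List.mem_pyRange_one] at hd
      rw [if_neg (by omega)]
    have h3 : ((PySem.List.pyRange hi B 1).map (fun d => if lo ≤ d ∧ d < hi then g d else 0)).sum = 0 := by
      apply List.sum_eq_zero; intro y hy
      simp only [List.mem_map] at hy
      obtain ⟨d, hd, rfl⟩ := hy
      rw [PySem.List.mem_pyRange_one] at hd
      rw [if_neg (by omega)]
    have h2 : (PySem.List.pyRange lo hi 1).map (fun d => if lo ≤ d ∧ d < hi then g d else 0)
        = (PySem.List.pyRange lo hi 1).map g := by
      apply List.map_congr_left; intro d hd
      rw [PySem.List.mem_pyRange_one] at hd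
      rw [if_pos (by omega)]
    rw [h1, h2, h3]; ring
  · rw [show PySem.List.pyRange lo hi 1 = [] from PySem.List.pyRange_one_eq_nil (by omega)]
    simp only [List.map_nil, List.sum_nil]
    apply List.sum_eq_zero; intro y hy
    simp only [List.mem_map] at hy
    obtain ⟨d, hd, rfl⟩ := hy
    rw [if_neg (by omega)]

-- characterizations of one level of A's recursion
theorem pvFA_nonpath_false (path : PySem.Set Int) (s : List Char) (idx rem : Nat) (last : Int)
    (hp : PySem.Set.contains path (idx : Int) = false) :
    pvFA path s idx (rem+1) last false = 10 * pvFA path s (idx+1) rem last false := by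
  simp only [pvFA, hp, Bool.false_and, Bool.false_eq_true, if_false]
  rw [show PySem.List.pyRange 0 (9+1) 1 = [0,1,2,3,4,5,6,7,8,9] from by decide]
  simp only [List.foldl]
  ring
theorem pvFA_nonpath_true (path : PySem.Set Int) (s : List Char) (idx rem : Nat) (last : Int)
    (hp : PySem.Set.contains path (idx : Int) = false)
    (hub : 0 ≤ pvDigit (s.getD idx '0')) :
    pvFA path s idx (rem+1) last true
      = pvDigit (s.getD idx '0') * pvFA path s (idx+1) rem last false
        + pvFA path s (idx+1) rem last true := by
  set ub := pvDigit (s.getD idx '0') with hubdef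
  simp only [pvFA, hp, Bool.false_eq_true, if_false, if_true, Bool.true_and, ← hubdef]
  rw [PySem.List.pyRange_one_succ_right hub, List.foldl_append]
  have hcong := PySem.List.foldl_congr_mem (PySem.List.pyRange 0 ub 1)
      (fun res digit => res + pvFA path s (idx+1) rem last (digit == ub))
      (fun res digit => res + pvFA path s (idx+1) rem last false) 0
      (by
        intro acc d hd
        rw [PySem.List.mem_pyRange_one] at hd
        have : (d == ub) = false := by simp; omega
        simp only [this])
  rw [hcong, PySem.List.foldl_add _ (fun _ => pvFA path s (idx+1) rem last false) 0]
  have hself : (ub == ub) = true := by simp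
  simp only [List.foldl_cons, List.foldl_nil, hself, if_true,
    PySem.List.sum_map_const_int, PySem.List.length_pyRange_one]
  have h2 : (((ub - 0).toNat : Int)) = ub := by omega
  rw [h2]
  ring
theorem pvFA_path_false (path : PySem.Set Int) (s : List Char) (idx rem : Nat) (last : Int)
    (hp : PySem.Set.contains path (idx : Int) = true) (hlast : 0 ≤ last) :
    pvFA path s idx (rem+1) last false
      = ((PySem.List.pyRange last 10 1).map (fun d => pvFA path s (idx+1) rem d false)).sum := by
  simp only [pvFA, hp, Bool.false_and, Bool.false_eq_true, if_false, if_true, ge_iff_le]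
  have hcong := PySem.List.foldl_congr_mem (PySem.List.pyRange 0 (9+1) 1)
      (fun res digit => if last ≤ digit then res + pvFA path s (idx+1) rem digit false else res)
      (fun res digit => res + (if last ≤ digit ∧ digit < 10 then pvFA path s (idx+1) rem digit false else 0)) 0
      (by
        intro acc d hd
        rw [PySem.List.mem_pyRange_one] at hd
        beta_reduce
        by_cases hld : last ≤ d
        · rw [if_pos hld, if_pos ⟨hld, by omega⟩]
        · rw [if_neg hld, if_neg (by tauto)]; ring)
  rw [hcong, PySem.List.foldl_add _ (fun d => if last ≤ d ∧ d < 10 then pvFA path s (idx+1) rem d false else 0) 0]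
  rw [show ((9:Int)+1) = 10 from by norm_num]
  rw [pvSumWindow _ last 10 10 hlast (by norm_num)]
  ring
theorem pvFA_path_true (path : PySem.Set Int) (s : List Char) (idx rem : Nat) (last : Int)
    (hp : PySem.Set.contains path (idx : Int) = true) (hlast : 0 ≤ last)
    (hub : 0 ≤ pvDigit (s.getD idx '0')) :
    pvFA path s idx (rem+1) last true
      = ((PySem.List.pyRange last (pvDigit (s.getD idx '0')) 1).map (fun d => pvFA path s (idx+1) rem d false)).sum
        + (if last ≤ pvDigit (s.getD idx '0') then pvFA path s (idx+1) rem (pvDigit (s.getD idx '0')) true else 0) := by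
  set ub := pvDigit (s.getD idx '0') with hubdef
  simp only [pvFA, hp, if_true, Bool.true_and, ge_iff_le, ← hubdef]
  rw [PySem.List.pyRange_one_succ_right hub, List.foldl_append]
  have hcong := PySem.List.foldl_congr_mem (PySem.List.pyRange 0 ub 1)
      (fun res digit => if last ≤ digit then res + pvFA path s (idx+1) rem digit (digit == ub) else res)
      (fun res digit => res + (if last ≤ digit ∧ digit < ub then pvFA path s (idx+1) rem digit false else 0)) 0
      (by
        intro acc d hd
        rw [PySem.List.mem_pyRange_one] at hd
        have hne : (d == ub) = false := by simp; omega
        beta_reduce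
        simp only [hne]
        by_cases hld : last ≤ d
        · rw [if_pos hld, if_pos ⟨hld, by omega⟩]
        · rw [if_neg hld, if_neg (by tauto)]; ring)
  rw [hcong, PySem.List.foldl_add _ (fun d => if last ≤ d ∧ d < ub then pvFA path s (idx+1) rem d false else 0) 0]
  rw [pvSumWindow _ last ub ub hlast le_rfl]
  have hself : (ub == ub) = true := by simp
  simp only [List.foldl_cons, List.foldl_nil, hself]
  by_cases hcase : last ≤ ub
  · rw [if_pos hcase, if_pos hcase]; ring
  · rw [if_neg hcase, if_neg hcase]; ring
theorem pvLen10 (free : List Int) (h : free.length = 10) :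
    ∃ a0 a1 a2 a3 a4 a5 a6 a7 a8 a9 : Int, free = [a0,a1,a2,a3,a4,a5,a6,a7,a8,a9] := by
  match free, h with
  | [a0,a1,a2,a3,a4,a5,a6,a7,a8,a9], _ => exact ⟨a0,a1,a2,a3,a4,a5,a6,a7,a8,a9, rfl⟩

-- the loop invariant: B's state weighted by A's continuation values equals A's value
set_option maxHeartbeats 1600000 in
theorem pvInv (path : PySem.Set Int) (s : List Char)
    (hs : ∀ idx : Nat, idx < 16 → 0 ≤ pvDigit (s.getD idx '0') ∧ pvDigit (s.getD idx '0') ≤ 9) :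
    ∀ (rem idx : Nat) (free : List Int) (tLast : Int) (tAlive : Bool),
      idx + rem = 16 → free.length = 10 → (tAlive = true → 0 ≤ tLast ∧ tLast ≤ 9) →
      (pvLoopB path s idx rem (free, tLast, tAlive)).1.sum
        + (if (pvLoopB path s idx rem (free, tLast, tAlive)).2.2 then 1 else 0)
      = ((PySem.List.pyRange 0 10 1).map
          (fun d => PySem.List.pyGetD free d 0 * pvFA path s idx rem d false)).sum
        + (if tAlive then pvFA path s idx rem tLast true else 0) := by
  intro rem
  induction rem with
  | zero =>
    intro idx free tLast tAlive hidx hlen ht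
    obtain ⟨a0,a1,a2,a3,a4,a5,a6,a7,a8,a9, rfl⟩ := pvLen10 free hlen
    rw [show PySem.List.pyRange 0 10 1 = [0,1,2,3,4,5,6,7,8,9] from by decide]
    simp only [pvLoopB, pvFA, List.map_cons, List.map_nil, List.sum_cons, List.sum_nil, pysem]
    cases tAlive <;> simp <;> ring
  | succ rem ih =>
    intro idx free tLast tAlive hidx hlen ht
    obtain ⟨a0,a1,a2,a3,a4,a5,a6,a7,a8,a9, rfl⟩ := pvLen10 free hlen
    obtain ⟨hub0, hub9⟩ := hs idx (by omega)
    set ub := pvDigit (s.getD idx '0') with hubdef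
    have R10 : PySem.List.pyRange 0 10 1 = [0,1,2,3,4,5,6,7,8,9] := by decide
    have E0 : PySem.List.pyRange 0 10 1 = [0, 1, 2, 3, 4, 5, 6, 7, 8, 9] := by decide
    have E1 : PySem.List.pyRange 1 10 1 = [1, 2, 3, 4, 5, 6, 7, 8, 9] := by decide
    have E2 : PySem.List.pyRange 2 10 1 = [2, 3, 4, 5, 6, 7, 8, 9] := by decide
    have E3 : PySem.List.pyRange 3 10 1 = [3, 4, 5, 6, 7, 8, 9] := by decide
    have E4 : PySem.List.pyRange 4 10 1 = [4, 5, 6, 7, 8, 9] := by decide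
    have E5 : PySem.List.pyRange 5 10 1 = [5, 6, 7, 8, 9] := by decide
    have E6 : PySem.List.pyRange 6 10 1 = [6, 7, 8, 9] := by decide
    have E7 : PySem.List.pyRange 7 10 1 = [7, 8, 9] := by decide
    have E8 : PySem.List.pyRange 8 10 1 = [8, 9] := by decide
    have E9 : PySem.List.pyRange 9 10 1 = [9] := by decide
    by_cases hp : PySem.Set.contains path (idx : Int) = true
    · have hF : ∀ last, 0 ≤ last → pvFA path s idx (rem+1) last false
          = ((PySem.List.pyRange last 10 1).map (fun d => pvFA path s (idx+1) rem d false)).sum :=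
        fun last h => pvFA_path_false path s idx rem last hp h
      cases tAlive with
      | true =>
        obtain ⟨ht0, ht9⟩ := ht rfl
        have FT := pvFA_path_true path s idx rem tLast hp ht0 hub0
        rw [← hubdef] at FT
        rw [pvLoopB]
        simp only [hp, if_true, R10, List.foldl_cons, List.foldl_nil, ← hubdef]
        norm_num [PySem.List.pyGetD, PySem.List.pyGet?, PySem.List.pyIdx?, show Int.toNat 2 = 2 from rfl, show Int.toNat 3 = 3 from rfl, show Int.toNat 4 = 4 from rfl, show Int.toNat 5 = 5 from rfl, show Int.toNat 6 = 6 from rfl, show Int.toNat 7 = 7 from rfl, show Int.toNat 8 = 8 from rfl, show Int.toNat 9 = 9 from rfl]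
        rw [ih (idx+1) _ ub (decide (tLast ≤ ub)) (by omega) (by simp)
              (fun _ => ⟨hub0, hub9⟩)]
        rw [R10]
        simp only [List.map_cons, List.map_nil, List.sum_cons, List.sum_nil]
        norm_num [PySem.List.pyGetD, PySem.List.pyGet?, PySem.List.pyIdx?, show Int.toNat 2 = 2 from rfl, show Int.toNat 3 = 3 from rfl, show Int.toNat 4 = 4 from rfl, show Int.toNat 5 = 5 from rfl, show Int.toNat 6 = 6 from rfl, show Int.toNat 7 = 7 from rfl, show Int.toNat 8 = 8 from rfl, show Int.toNat 9 = 9 from rfl]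
        rw [FT, hF 0 (by norm_num), hF 1 (by norm_num), hF 2 (by norm_num), hF 3 (by norm_num), hF 4 (by norm_num), hF 5 (by norm_num), hF 6 (by norm_num), hF 7 (by norm_num), hF 8 (by norm_num), hF 9 (by norm_num)]
        rw [E0, E1, E2, E3, E4, E5, E6, E7, E8, E9]
        simp only [List.map_cons, List.map_nil, List.sum_cons, List.sum_nil]
        have hw := pvSumWindow (fun d => pvFA path s (idx+1) rem d false) tLast ub 10 ht0 (by omega)
        rw [R10] at hw
        simp only [List.map_cons, List.map_nil, List.sum_cons, List.sum_nil] at hw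
        simp only [add_mul, ite_mul, one_mul, zero_mul, decide_eq_true_eq]
        linarith [hw]
      | false =>
        rw [pvLoopB]
        simp only [hp, if_true, Bool.false_eq_true, if_false, R10, List.foldl_cons, List.foldl_nil]
        norm_num [PySem.List.pyGetD, PySem.List.pyGet?, PySem.List.pyIdx?, show Int.toNat 2 = 2 from rfl, show Int.toNat 3 = 3 from rfl, show Int.toNat 4 = 4 from rfl, show Int.toNat 5 = 5 from rfl, show Int.toNat 6 = 6 from rfl, show Int.toNat 7 = 7 from rfl, show Int.toNat 8 = 8 from rfl, show Int.toNat 9 = 9 from rfl]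
        rw [ih (idx+1) _ tLast false (by omega) (by simp) (by simp)]
        rw [R10]
        simp only [List.map_cons, List.map_nil, List.sum_cons, List.sum_nil]
        norm_num [PySem.List.pyGetD, PySem.List.pyGet?, PySem.List.pyIdx?, show Int.toNat 2 = 2 from rfl, show Int.toNat 3 = 3 from rfl, show Int.toNat 4 = 4 from rfl, show Int.toNat 5 = 5 from rfl, show Int.toNat 6 = 6 from rfl, show Int.toNat 7 = 7 from rfl, show Int.toNat 8 = 8 from rfl, show Int.toNat 9 = 9 from rfl]
        rw [hF 0 (by norm_num), hF 1 (by norm_num), hF 2 (by norm_num), hF 3 (by norm_num), hF 4 (by norm_num), hF 5 (by norm_num), hF 6 (by norm_num), hF 7 (by norm_num), hF 8 (by norm_num), hF 9 (by norm_num)]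
        rw [E0, E1, E2, E3, E4, E5, E6, E7, E8, E9]
        simp only [List.map_cons, List.map_nil, List.sum_cons, List.sum_nil]
        ring
    · have hp' : PySem.Set.contains path (idx : Int) = false := by simpa using hp
      have hF : ∀ last, pvFA path s idx (rem+1) last false
          = 10 * pvFA path s (idx+1) rem last false :=
        fun last => pvFA_nonpath_false path s idx rem last hp'
      cases tAlive with
      | true =>
        obtain ⟨ht0, ht9⟩ := ht rfl
        have FT := pvFA_nonpath_true path s idx rem tLast hp' hub0
        rw [← hubdef] at FT
        interval_cases tLast <;>
        · rw [pvLoopB]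
          simp only [hp', Bool.false_eq_true, if_false, if_true, List.map_cons, List.map_nil, ← hubdef]
          norm_num [PySem.List.pySetD, PySem.List.pySet?, PySem.List.pyGetD, PySem.List.pyGet?, PySem.List.pyIdx?, show Int.toNat 2 = 2 from rfl, show Int.toNat 3 = 3 from rfl, show Int.toNat 4 = 4 from rfl, show Int.toNat 5 = 5 from rfl, show Int.toNat 6 = 6 from rfl, show Int.toNat 7 = 7 from rfl, show Int.toNat 8 = 8 from rfl, show Int.toNat 9 = 9 from rfl]
          rw [ih (idx+1) _ _ true (by omega) (by simp) (fun _ => by norm_num)]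
          rw [R10]
          simp only [List.map_cons, List.map_nil, List.sum_cons, List.sum_nil]
          norm_num [PySem.List.pyGetD, PySem.List.pyGet?, PySem.List.pyIdx?, show Int.toNat 2 = 2 from rfl, show Int.toNat 3 = 3 from rfl, show Int.toNat 4 = 4 from rfl, show Int.toNat 5 = 5 from rfl, show Int.toNat 6 = 6 from rfl, show Int.toNat 7 = 7 from rfl, show Int.toNat 8 = 8 from rfl, show Int.toNat 9 = 9 from rfl]
          rw [FT]
          simp only [hF]
          ring
      | false =>
        rw [pvLoopB]
        simp only [hp', Bool.false_eq_true, if_false, List.map_cons, List.map_nil]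
        rw [ih (idx+1) _ tLast false (by omega) (by simp) (by simp)]
        rw [R10]
        simp only [List.map_cons, List.map_nil, List.sum_cons, List.sum_nil, hF,
          Bool.false_eq_true, if_false]
        norm_num [PySem.List.pyGetD, PySem.List.pyGet?, PySem.List.pyIdx?, show Int.toNat 2 = 2 from rfl, show Int.toNat 3 = 3 from rfl, show Int.toNat 4 = 4 from rfl, show Int.toNat 5 = 5 from rfl, show Int.toNat 6 = 6 from rfl, show Int.toNat 7 = 7 from rfl, show Int.toNat 8 = 8 from rfl, show Int.toNat 9 = 9 from rfl]
        ring

-- ===== VERDICT (by name: the statement is the Claim_ definition above) =====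
theorem pvSolveAB (path : PySem.Set Int) (x : Int) (hx0 : 0 ≤ x) (hx1 : x ≤ 2147483648) :
    pvSolveB path x = pvSolveA path x := by
  have hs := pvGoodS x hx0 hx1
  rw [pvSolveA_eq]
  unfold pvSolveB
  rw [pvInv path (pvZfill16 x) hs 16 0 (List.replicate 10 0) 0 true rfl (by simp) (by norm_num)]
  rw [show PySem.List.pyRange 0 10 1 = [0,1,2,3,4,5,6,7,8,9] from by decide]
  norm_num [PySem.List.pyGetD, PySem.List.pyGet?, PySem.List.pyIdx?,
    show Int.toNat 2 = 2 from rfl, show Int.toNat 3 = 3 from rfl, show Int.toNat 4 = 4 from rfl,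
    show Int.toNat 5 = 5 from rfl, show Int.toNat 6 = 6 from rfl, show Int.toNat 7 = 7 from rfl,
    show Int.toNat 8 = 8 from rfl, show Int.toNat 9 = 9 from rfl, List.replicate]

theorem countGoodIntegersOnPath_spec : Claim_equal_countGoodIntegersOnPath := by
  intro l r directions hdom hpre
  obtain ⟨hl, hr⟩ := hpre
  have hdom' : -2147483648 ≤ l ∧ l ≤ 2147483648 ∧ -2147483648 ≤ r ∧ r ≤ 2147483648 := by
    unfold Dom_countGoodIntegersOnPath at hdom
    simp only [pvDomInt, Bool.and_eq_true, decide_eq_true_eq] at hdom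
    tauto
  unfold Spec_countGoodIntegersOnPath countGoodIntegersOnPath countGoodIntegersOnPath_alt
  show pvSolveA (pvBuildPath directions) r - pvSolveA (pvBuildPath directions) (l - 1)
      = pvSolveB (pvBuildPath directions) r - pvSolveB (pvBuildPath directions) (l - 1)
  rw [pvSolveAB _ r hr (by omega), pvSolveAB _ (l-1) (by omega) (by omega)]
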